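-- pv_equiv track=rewrite | github.com/andresparradev/training-camp-argentina | day4/C.py | solve
-- ===== SOURCE A (Python) =====
-- def solve(k):
--     digits = len(str(k))
--     n = int(str(k)[0])
--     count = 0
--
--     if k != 1:
--         for i in range(n-1):
--             count += 10
--
--         for i in range(0, digits):
--             count += (i+1)
--     else:
--         count = 1
--
--     return count
-- ===== SOURCE B (Python) =====
-- def solve(k):
--     digits = len(str(k))
--     n = int(str(k)[0])
--     return 10 * max(n - 1, 0) + digits * (digits + 1) // 2
-- ===== Notes on version B (the rewrite author's own statement) =====
-- stated objective: simpler
-- what changed: Replaced the two counting loops (10 per step up to n-1, then 1..digits) and the redundant k==1 special case by a single closed-form expression 10*max(n-1,0) + digits*(digits+1)//2 over the same str-based parsing.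
import Mathlib
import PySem

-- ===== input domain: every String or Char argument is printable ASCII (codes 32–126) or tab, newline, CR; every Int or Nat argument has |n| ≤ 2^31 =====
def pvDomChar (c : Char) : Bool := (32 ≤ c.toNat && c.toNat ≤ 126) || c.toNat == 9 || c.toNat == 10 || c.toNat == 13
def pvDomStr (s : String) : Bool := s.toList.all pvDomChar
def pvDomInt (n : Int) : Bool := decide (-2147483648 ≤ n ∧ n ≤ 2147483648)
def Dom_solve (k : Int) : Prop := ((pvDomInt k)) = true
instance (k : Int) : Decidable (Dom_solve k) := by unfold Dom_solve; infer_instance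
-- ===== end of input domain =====

-- B replaces A's two counting loops by the closed form 10*max(n-1,0) + digits*(digits+1)//2 (simpler; drops the redundant k==1 branch).

-- ===== PORT A =====
def solve (k : Int) : Int :=
  let s : List Char := PySem.Int.toChars k
  let digits : Int := s.length
  -- int(str(k)[0]); the 'none' cases (IndexError/ValueError) are Python raises, excluded by Pre_solve; 0 is a dummy
  let n : Int := (PySem.Int.ofChars? [(PySem.List.pyGet? s 0).getD '0']).getD 0
  let count : Int := 0
  if k ≠ 1 then
    let count := (PySem.List.pyRange 0 (n - 1) 1).foldl (fun c _ => c + 10) count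
    let count := (PySem.List.pyRange 0 digits 1).foldl (fun c i => c + (i + 1)) count
    count
  else
    1

-- ===== PORT B =====
def solve_alt (k : Int) : Int :=
  let s : List Char := PySem.Int.toChars k
  let digits : Int := s.length
  let n : Int := (PySem.Int.ofChars? [(PySem.List.pyGet? s 0).getD '0']).getD 0
  10 * max (n - 1) 0 + PySem.Int.floordiv (digits * (digits + 1)) 2

-- ===== PRECONDITION & SPEC =====
-- Pre_ excludes negative k, on which Python A (and B) raise ValueError at int(str(k)[0]) = int('-').
def Pre_solve (k : Int) : Prop := 0 ≤ k
instance (k : Int) : Decidable (Pre_solve k) := by unfold Pre_solve; infer_instance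
def pvWitness_solve : Int := (37)
def Spec_solve (k : Int) (out : Int) : Prop := out = solve_alt k
instance (k : Int) (out : Int) : Decidable (Spec_solve k out) := by unfold Spec_solve; infer_instance

-- ===== CLAIM (what is proved, stated in full; the proofs are below) =====
def Claim_equal_solve : Prop := ∀ (k : Int), Dom_solve k → Pre_solve k → Spec_solve k (solve k)

-- ===== LEMMAS AND PROOFS =====

-- A's first loop: adds 10 per element
theorem foldl_add10 (l : List Int) (c0 : Int) :
    l.foldl (fun c _ => c + 10) c0 = c0 + 10 * l.length := by
  induction l generalizing c0 with
  | nil => simp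
  | cons x xs ih => simp [List.foldl, ih]; ring

-- A's second loop over range(0, d): triangular sum
theorem foldl_tri (nn : Nat) (c0 : Int) :
    (PySem.List.pyRange 0 (nn : Int) 1).foldl (fun c i => c + (i + 1)) c0
      = c0 + PySem.Int.floordiv ((nn : Int) * ((nn : Int) + 1)) 2 := by
  induction nn generalizing c0 with
  | zero => simp [PySem.List.pyRange_one_eq_nil]
  | succ m ih =>
      rw [show ((m + 1 : Nat) : Int) = (m : Int) + 1 by push_cast; ring,
          PySem.List.pyRange_one_succ_right (Int.natCast_nonneg m),
          List.foldl_append, ih,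
          PySem.Int.floordiv_eq_ediv_of_pos (by norm_num),
          PySem.Int.floordiv_eq_ediv_of_pos (by norm_num)]
      have h1 : ((m : Int) + 1) * (((m : Int) + 1) + 1)
          = (m : Int) * ((m : Int) + 1) + 2 * ((m : Int) + 1) := by ring
      simp only [List.foldl]
      omega

theorem solve_closed (k : Int) (hk : 0 ≤ k) : solve k = solve_alt k := by
  unfold solve solve_alt
  by_cases h1 : k = 1
  · subst h1; decide
  · simp only [h1, ne_eq, not_false_eq_true, if_pos]
    set s := PySem.Int.toChars k with hs
    set n : Int := (PySem.Int.ofChars? [(PySem.List.pyGet? s 0).getD '0']).getD 0 with hn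
    rw [foldl_add10, PySem.List.length_pyRange_one, foldl_tri s.length,
        PySem.Int.floordiv_eq_ediv_of_pos (by norm_num),
        ← Int.toNat_eq_max]
    simp only [sub_zero]
    set q : Int := (s.length : Int) * ((s.length : Int) + 1) with hq
    omega

-- ===== VERDICT (by name: the statement is the Claim_ definition above) =====
theorem solve_spec : Claim_equal_solve := by
  intro k _ hpre
  unfold Spec_solve
  exact solve_closed k hpre
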